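-- pv_equiv track=rewrite | github.com/qodhrkawk/Algorithm_Practice | 2021/3/19/4.py | solution
-- ===== SOURCE A (Python) =====
-- from itertools import combinations
-- from itertools import product
--
-- def solution(a):
--     answer = 0
--
--     m = len(a)
--     n = len(a[0])
--
--     candidate = [i for i in range(m)]
--
--
--     ones = []
--
--     for j in range(n) :
--         count = 0
--         for i in range(m) :
--             if a[i][j] == 1 :
--                 count += 1
--
--         ones.append(count)
--
--     arrays = []
--     for one in ones :
--         comb = list(combinations(candidate,one))
--         arrays.append(comb)
--
--     for elements in product(*arrays) :
--         checks = [0 for _ in range(m)]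
--         for elem in elements :
--             for e in elem :
--                 checks[e] += 1
--         flag = True
--         for c in checks :
--             if c%2 == 1 :
--                 flag = False
--         if flag :
--             answer += 1
--
--
--     return answer%(10**17+19)
-- ===== SOURCE B (Python) =====
-- def esymm_step(coeffs, v):
--     shifted = [0] + [v * c for c in coeffs]
--     padded = coeffs + [0]
--     return [padded[i] + shifted[i] for i in range(len(shifted))]
--
--
-- def esymm_coeffs(values):
--     # coefficients of prod_i (1 + values[i] * x): entry k = k-th elementary symmetric polynomial
--     coeffs = [1]
--     for v in values:
--         coeffs = esymm_step(coeffs, v)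
--     return coeffs
--
--
-- def solution(a):
--     # Character-sum (Fourier over {+1,-1}^m) reformulation: the number of tuples of
--     # row-subsets with every row covered an even number of times equals
--     # (1/2^m) * sum_t C(m,t) * prod_j e_{ones[j]}(sign vector with t entries -1).
--     MOD = 10 ** 17 + 19
--     m = len(a)
--     n = len(a[0])
--     ones = []
--     for j in range(n):
--         count = 0
--         for i in range(m):
--             if a[i][j] == 1:
--                 count += 1
--         ones.append(count)
--     binom = esymm_coeffs([1] * m)
--     total = 0
--     for t in range(m + 1):
--         coeffs = esymm_coeffs([-1] * t + [1] * (m - t))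
--         prod_val = binom[t]
--         for k in ones:
--             prod_val *= coeffs[k]
--         total += prod_val
--     return (total // (2 ** m)) % MOD
-- ===== Notes on version B (the rewrite author's own statement) =====
-- stated objective: alternative
-- what changed: B replaces A's enumeration of all tuples of column-wise row-subsets (itertools.product of combinations, filtered by row parity) with an exact character-sum identity over ±1 sign vectors grouped by their number of -1 entries, evaluated via elementary-symmetric-polynomial coefficient tables and divided by 2^m.
import Mathlib
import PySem

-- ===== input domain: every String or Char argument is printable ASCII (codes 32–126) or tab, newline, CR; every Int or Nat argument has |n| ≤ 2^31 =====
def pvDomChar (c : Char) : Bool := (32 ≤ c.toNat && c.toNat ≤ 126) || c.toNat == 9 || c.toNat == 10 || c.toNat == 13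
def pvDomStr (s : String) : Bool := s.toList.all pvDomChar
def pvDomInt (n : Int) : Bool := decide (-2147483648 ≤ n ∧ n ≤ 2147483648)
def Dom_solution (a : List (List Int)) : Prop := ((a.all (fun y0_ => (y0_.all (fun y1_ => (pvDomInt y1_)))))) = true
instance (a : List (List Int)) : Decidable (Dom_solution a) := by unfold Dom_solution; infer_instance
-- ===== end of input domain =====

-- B replaces A's enumeration of all tuples of column-wise row-subsets by the exact
-- character sum (1/2^m)·Σ_t C(m,t)·Π_j e_{ones[j]} over ±1 sign vectors with t entries -1,
-- computed from elementary-symmetric-polynomial coefficient tables (objective: alternative).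

-- ===== PORT A =====
-- itertools.combinations(l, k), lexicographic
def pvCombinations : List Int → Nat → List (List Int)
  | _, 0 => [[]]
  | [], _ + 1 => []
  | x :: xs, k + 1 => ((pvCombinations xs k).map (fun c => x :: c)) ++ pvCombinations xs (k + 1)

-- itertools.product(*arrays)
def pvProduct : List (List (List Int)) → List (List (List Int))
  | [] => [[]]
  | xs :: rest => xs.flatMap (fun x => (pvProduct rest).map (fun t => x :: t))

-- checks[e] += 1 (e is always an in-range index taken from range(m))
def pvInc : List Int → Int → List Int
  | [], _ => []
  | c :: cs, e => if e = 0 then (c + 1) :: cs else c :: pvInc cs (e - 1)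

-- the 'ones' double loop (count of entries == 1 per column), textually shared by A and B
def pvOnes (a : List (List Int)) : List Nat :=
  (List.range (a.headD []).length).map (fun j =>
    a.foldl (fun cnt row => if row.getD j 0 = 1 then cnt + 1 else cnt) 0)

def solution (a : List (List Int)) : Int :=
  let m := a.length
  let candidate := PySem.List.pyRange 0 (m : Int) 1
  let ones := pvOnes a
  let arrays := ones.map (fun one => pvCombinations candidate one)
  let answer := (pvProduct arrays).foldl (fun answer elements =>
    let checks := elements.foldl (fun ch elem => elem.foldl pvInc ch) (List.replicate m (0 : Int))
    let flag := checks.foldl (fun fl c => if PySem.Int.mod c 2 = 1 then false else fl) true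
    if flag then answer + 1 else answer) (0 : Int)
  PySem.Int.mod answer (10 ^ 17 + 19)

-- ===== PORT B =====
-- esymm_step: one polynomial-multiplication step coeffs ↦ coeffs·(1 + v·x)
def pvStep (coeffs : List Int) (v : Int) : List Int :=
  List.zipWith (· + ·) (coeffs ++ [0]) (0 :: coeffs.map (fun c => v * c))

-- esymm_coeffs: coefficient list of Π(1 + vᵢx), entry k = k-th elementary symmetric poly
def pvCoeffs (values : List Int) : List Int := values.foldl pvStep [1]

def solution_alt (a : List (List Int)) : Int :=
  let m := a.length
  let ones := pvOnes a
  let binom := pvCoeffs (List.replicate m 1)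
  let total := (List.range (m + 1)).foldl (fun total t =>
    let coeffs := pvCoeffs (List.replicate t (-1) ++ List.replicate (m - t) 1)
    total + ones.foldl (fun p k => p * coeffs.getD k 0) (binom.getD t 0)) (0 : Int)
  PySem.Int.mod (PySem.Int.floordiv total (2 ^ m)) (10 ^ 17 + 19)

-- ===== PRECONDITION & SPEC =====
-- Pre_ excludes exactly the inputs on which A raises IndexError: an empty matrix
-- (a[0] raises) and matrices with a row shorter than the first row (a[i][j] raises).
def Pre_solution (a : List (List Int)) : Prop :=
  a ≠ [] ∧ ∀ row ∈ a, (a.headD []).length ≤ row.length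
instance (a : List (List Int)) : Decidable (Pre_solution a) := by unfold Pre_solution; infer_instance

def pvWitness_solution : List (List Int) := [[1, 0], [1, 1]]

def Spec_solution (a : List (List Int)) (out : Int) : Prop := out = solution_alt a
instance (a : List (List Int)) (out : Int) : Decidable (Spec_solution a out) := by unfold Spec_solution; infer_instance

-- ===== CLAIM (what is proved, stated in full; the proofs are below) =====
def Claim_equal_solution : Prop := ∀ (a : List (List Int)), Dom_solution a → Pre_solution a → Spec_solution a (solution a)

-- ===== LEMMAS AND PROOFS =====

def esym : List Int → Nat → Int
  | _, 0 => 1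
  | [], _ + 1 => 0
  | x :: xs, k + 1 => x * esym xs k + esym xs (k + 1)

theorem esym_zero (l : List Int) : esym l 0 = 1 := by cases l <;> rfl

theorem esym_of_gt : ∀ (l : List Int) (k : Nat), l.length < k → esym l k = 0
  | [], k + 1, _ => rfl
  | x :: xs, k + 1, h => by
    simp only [esym]
    rw [esym_of_gt xs k (by simpa using h), esym_of_gt xs (k+1) (by simp at h; omega)]
    ring

theorem esym_snoc : ∀ (l : List Int) (v : Int) (k : Nat),
    esym (l ++ [v]) (k + 1) = esym l (k + 1) + v * esym l k
  | [], v, 0 => by simp [esym]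
  | [], v, k + 1 => by simp [esym, esym_of_gt]
  | x :: xs, v, 0 => by
    simp only [List.cons_append, esym, esym_snoc xs v 0, esym_zero]; ring
  | x :: xs, v, k + 1 => by
    simp only [List.cons_append, esym, esym_snoc xs v]
    ring

def coeffVec (l : List Int) : List Int := (List.range (l.length + 1)).map (esym l)

theorem pvStep_coeffVec (l : List Int) (v : Int) : pvStep (coeffVec l) v = coeffVec (l ++ [v]) := by
  have hlen : (coeffVec l).length = l.length + 1 := by simp [coeffVec]
  apply List.ext_getElem
  · simp [pvStep, coeffVec]
  · intro i h1 h2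
    simp only [pvStep, List.getElem_zipWith]
    rcases i with _ | j
    · simp [coeffVec, esym_zero]
    · have hj : j < l.length + 1 := by
        simp [pvStep, hlen] at h1; omega
      have e2 : (0 :: (coeffVec l).map (fun c => v * c))[j+1]'(by simp [hlen]; omega)
          = v * esym l j := by
        simp [coeffVec]
      have e1 : (coeffVec l ++ [0])[j+1]'(by simp [hlen]; omega) = esym l (j+1) := by
        by_cases hj' : j < l.length
        · rw [List.getElem_append_left (by simp [hlen]; omega)]
          simp [coeffVec]
        · have hje : j = l.length := by omega
          subst hje
          rw [List.getElem_append_right (by simp [hlen])]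
          simp [hlen, esym_of_gt]
      rw [e1, e2]
      have : (coeffVec (l ++ [v]))[j+1]'h2 = esym (l ++ [v]) (j+1) := by
        simp [coeffVec]
      rw [this, esym_snoc]

theorem pvCoeffs_eq (values : List Int) : pvCoeffs values = coeffVec values := by
  have key : ∀ (l p : List Int), l.foldl pvStep (coeffVec p) = coeffVec (p ++ l) := by
    intro l
    induction l with
    | nil => simp
    | cons v l ih =>
      intro p
      simp only [List.foldl_cons, pvStep_coeffVec, ih (p ++ [v])]
      simp
  have h0 : coeffVec [] = [1] := rfl
  simpa [h0] using key values []

theorem pvCoeffs_getD (values : List Int) (k : Nat) :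
    (pvCoeffs values).getD k 0 = esym values k := by
  rw [pvCoeffs_eq]
  by_cases hk : k < values.length + 1
  · rw [List.getD_eq_getElem _ _ (by simp [coeffVec, hk])]
    simp [coeffVec]
  · rw [List.getD_eq_default _ _ (by simp [coeffVec]; omega), esym_of_gt _ _ (by omega)]
def pvSigns : Nat → List (List Int)
  | 0 => [[]]
  | m + 1 => (pvSigns m).map (fun s => 1 :: s) ++ (pvSigns m).map (fun s => -1 :: s)

theorem sum_flatMap' {α : Type} (l : List α) (h : α → List Int) :
    (l.flatMap h).sum = (l.map (fun x => (h x).sum)).sum := by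
  simp [List.flatMap_def, List.sum_flatten, List.map_map]; rfl

-- sum over combinations of products = elementary symmetric polynomial
theorem comb_sum : ∀ (d : List Int) (k : Nat) (f : Int → Int),
    ((pvCombinations d k).map (fun c => (c.map f).prod)).sum = esym (d.map f) k
  | _, 0, f => by simp [pvCombinations, esym_zero]
  | [], k + 1, f => by simp [pvCombinations, esym]
  | x :: xs, k + 1, f => by
    simp only [pvCombinations, List.map_append, List.sum_append, List.map_map]
    rw [show ((fun c => (List.map f c).prod) ∘ fun c => x :: c)
          = (fun c => f x * (List.map f c).prod) from rfl]
    simp only [esym, List.map_cons]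
    rw [← comb_sum xs k f, ← comb_sum xs (k+1) f]
    rw [List.sum_map_mul_left]

-- distributing the product over the cartesian product
theorem prod_expand : ∀ (arrays : List (List (List Int))) (g : List Int → Int),
    ((pvProduct arrays).map (fun T => (T.map g).prod)).sum
      = (arrays.map (fun xs => (xs.map g).sum)).prod
  | [], g => by simp [pvProduct]
  | xs :: rest, g => by
    simp only [pvProduct, List.map_cons, List.prod_cons]
    rw [List.map_flatMap]
    rw [sum_flatMap']
    have : ∀ x : List Int,
        (((pvProduct rest).map (fun t => x :: t)).map (fun T => (T.map g).prod)).sum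
          = g x * ((pvProduct rest).map (fun T => (T.map g).prod)).sum := by
      intro x
      simp only [List.map_map]
      rw [show ((fun T => (List.map g T).prod) ∘ fun t => x :: t)
            = (fun t => g x * (List.map g t).prod) from by
        funext t; simp [List.prod_cons]]
      rw [List.sum_map_mul_left]
    simp only [List.map_map, Function.comp_def] at this ⊢
    simp only [this]
    rw [prod_expand rest g, List.sum_map_mul_right]

-- swapping a double list sum
theorem sum_swap (l1 : List (List Int)) (l2 : List (List (List Int)))
    (f : List Int → List (List Int) → Int) :
    (l1.map (fun x => (l2.map (fun y => f x y)).sum)).sum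
      = (l2.map (fun y => (l1.map (fun x => f x y)).sum)).sum := by
  induction l1 with
  | nil => simp
  | cons x l1 ih =>
    simp only [List.map_cons, List.sum_cons, ih]
    rw [PySem.List.sum_map_add_int]

def pw (s : List Int) (ch : List Nat) : Int :=
  (List.zipWith (fun si c => si ^ c) s ch).prod

theorem signs_length : ∀ (m : Nat), ∀ s ∈ pvSigns m, s.length = m := by
  intro m
  induction m with
  | zero => intro s hs; simp [pvSigns] at hs; simp [hs]
  | succ m ih =>
    intro s hs
    simp only [pvSigns, List.mem_append, List.mem_map] at hs
    rcases hs with ⟨t, ht, rfl⟩ | ⟨t, ht, rfl⟩ <;> simp [ih t ht]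

theorem parity_sum : ∀ (m : Nat) (ch : List Nat), ch.length = m →
    ((pvSigns m).map (fun s => pw s ch)).sum
      = if ∀ c ∈ ch, Even c then 2 ^ m else 0 := by
  intro m
  induction m with
  | zero =>
    intro ch hch
    rw [List.length_eq_zero_iff] at hch
    subst hch
    simp [pvSigns, pw]
  | succ m ih =>
    intro ch hch
    rcases ch with _ | ⟨c, ch'⟩
    · simp at hch
    have hch' : ch'.length = m := by simpa using hch
    simp only [pvSigns, List.map_append, List.sum_append, List.map_map]
    have h1 : ((pvSigns m).map ((fun s => pw s (c :: ch')) ∘ fun s => 1 :: s)).sum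
        = ((pvSigns m).map (fun s => pw s ch')).sum := by
      apply congrArg List.sum
      apply List.map_congr_left
      intro s _
      show pw (1 :: s) (c :: ch') = pw s ch'
      simp [pw, List.zipWith_cons_cons]
    have h2 : ((pvSigns m).map ((fun s => pw s (c :: ch')) ∘ fun s => -1 :: s)).sum
        = (-1 : Int) ^ c * ((pvSigns m).map (fun s => pw s ch')).sum := by
      rw [← List.sum_map_mul_left]
      apply congrArg List.sum
      apply List.map_congr_left
      intro s _
      show pw (-1 :: s) (c :: ch') = (-1 : Int) ^ c * pw s ch'
      simp only [pw, List.zipWith_cons_cons, List.prod_cons]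
    rw [h1, h2, ih ch' hch']
    by_cases hc : Even c
    · rw [hc.neg_one_pow]
      by_cases hall : ∀ x ∈ ch', Even x
      · rw [if_pos hall,
          if_pos (show ∀ x ∈ c :: ch', Even x by
            intro x hx; rcases List.mem_cons.mp hx with rfl | h; exact hc; exact hall x h)]
        ring
      · rw [if_neg hall,
          if_neg (show ¬ ∀ x ∈ c :: ch', Even x from
            fun h => hall (fun x hx => h x (List.mem_cons_of_mem _ hx)))]
        ring
    · have hni : ¬ (∀ x ∈ c :: ch', Even x) := fun h => hc (h c (by simp))
      rw [(Nat.not_even_iff_odd.mp hc).neg_one_pow, if_neg hni]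
      split_ifs <;> ring

theorem esym_perm {l l' : List Int} (h : l.Perm l') : ∀ k, esym l k = esym l' k := by
  induction h with
  | nil => intro k; rfl
  | cons x _ ih =>
    intro k
    rcases k with _ | k
    · simp [esym_zero]
    · simp [esym, ih]
  | swap x y l =>
    intro k
    rcases k with _ | (_ | k) <;> simp [esym, esym_zero] <;> ring
  | trans _ _ ih1 ih2 => intro k; rw [ih1, ih2]

def pvVec (m t : Nat) : List Int := List.replicate t (-1) ++ List.replicate (m - t) 1

theorem group_sum : ∀ (m : Nat) (g : List Int → Int),
    (∀ s s', s.Perm s' → g s = g s') →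
    ((pvSigns m).map g).sum = ∑ t ∈ Finset.range (m + 1), ((m.choose t : Int) * g (pvVec m t)) := by
  intro m
  induction m with
  | zero =>
    intro g _
    simp [pvSigns, pvVec]
  | succ m ih =>
    intro g hg
    simp only [pvSigns, List.map_append, List.sum_append, List.map_map]
    have hg1 : ∀ s s', s.Perm s' → g (1 :: s) = g (1 :: s') := fun s s' h => hg _ _ (h.cons 1)
    have hgm : ∀ s s', s.Perm s' → g (-1 :: s) = g (-1 :: s') := fun s s' h => hg _ _ (h.cons (-1))
    rw [show (g ∘ fun s => 1 :: s) = (fun s => g (1 :: s)) from rfl,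
        show (g ∘ fun s => -1 :: s) = (fun s => g (-1 :: s)) from rfl,
        ih _ hg1, ih _ hgm]
    have e1 : ∀ t ∈ Finset.range (m + 1), (m.choose t : Int) * g (1 :: pvVec m t)
        = (m.choose t : Int) * g (pvVec (m + 1) t) := by
      intro t ht
      have htm : t ≤ m := by simpa [Nat.lt_succ_iff] using ht
      congr 1
      apply hg
      have : pvVec (m + 1) t = List.replicate t (-1) ++ 1 :: List.replicate (m - t) 1 := by
        simp [pvVec, Nat.succ_sub htm, List.replicate_succ]
      rw [this]
      exact List.perm_middle.symm
    have e2 : ∀ t, g (-1 :: pvVec m t) = g (pvVec (m + 1) (t + 1)) := by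
      intro t
      congr 1
      simp [pvVec, List.replicate_succ, Nat.succ_sub_succ]
    rw [Finset.sum_congr rfl e1]
    have e2' : ∑ t ∈ Finset.range (m + 1), (m.choose t : Int) * g (-1 :: pvVec m t)
        = ∑ t ∈ Finset.range (m + 1), (m.choose t : Int) * g (pvVec (m + 1) (t + 1)) := by
      apply Finset.sum_congr rfl
      intro t _
      rw [e2]
    rw [e2']
    -- Pascal recombination
    set h : Nat → Int := fun t => g (pvVec (m + 1) t) with hh
    have lhs1 : ∑ t ∈ Finset.range (m + 1), (m.choose t : Int) * h t
        + ∑ t ∈ Finset.range (m + 1), (m.choose t : Int) * h (t + 1)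
        = ∑ t ∈ Finset.range (m + 2), ((m + 1).choose t : Int) * h t := by
      rw [Finset.sum_range_succ' (fun t => ((m + 1).choose t : Int) * h t)]
      simp only [Nat.choose_succ_succ, Nat.choose_zero_right, Nat.cast_add,
        Nat.succ_eq_add_one, Nat.cast_one, one_mul, add_mul]
      rw [Finset.sum_add_distrib]
      have hA : ∑ t ∈ Finset.range (m + 1), (m.choose t : Int) * h t
          = (∑ x ∈ Finset.range (m + 1), (m.choose (x + 1) : Int) * h (x + 1)) + h 0 := by
        rw [Finset.sum_range_succ' (fun t => (m.choose t : Int) * h t),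
          Finset.sum_range_succ (fun x => (m.choose (x + 1) : Int) * h (x + 1))]
        simp [Nat.choose_succ_self]
      rw [hA]
      ring
    exact lhs1

theorem esym_replicate_one : ∀ (m t : Nat), esym (List.replicate m 1) t = (m.choose t : Int)
  | 0, 0 => by simp [esym]
  | 0, t + 1 => by simp [esym]
  | m + 1, 0 => by simp [esym_zero]
  | m + 1, t + 1 => by
    simp only [List.replicate_succ, esym, esym_replicate_one m t, esym_replicate_one m (t + 1),
      Nat.choose_succ_succ, Nat.cast_add]
    ring

theorem foldl_flag (P : Int → Prop) [DecidablePred P] :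
    ∀ (l : List Int) (b : Bool),
      l.foldl (fun fl c => if P c then false else fl) b
        = (b && l.all (fun c => decide (¬ P c))) := by
  intro l
  induction l with
  | nil => intro b; simp
  | cons c l ih =>
    intro b
    simp only [List.foldl_cons, List.all_cons]
    by_cases hc : P c
    · rw [if_pos hc, ih false]
      simp [hc]
    · rw [if_neg hc, ih b]
      simp [hc]

theorem length_pvInc : ∀ (ch : List Int) (e : Int), (pvInc ch e).length = ch.length
  | [], _ => rfl
  | c :: cs, e => by
    simp only [pvInc]
    split <;> simp [length_pvInc cs]

theorem pvInc_getD : ∀ (ch : List Int) (e : Int) (i : Nat), 0 ≤ e → e < (ch.length : Int) →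
    (pvInc ch e).getD i 0 = ch.getD i 0 + (if (i : Int) = e then 1 else 0)
  | [], e, i, he, hlt => by simp at hlt; omega
  | c :: cs, e, i, he, hlt => by
    simp only [pvInc]
    by_cases h0 : e = 0
    · subst h0
      rcases i with _ | j
      · simp
      · simp
        omega
    · rw [if_neg h0]
      rcases i with _ | j
      · simp only [List.getD_cons_zero]
        rw [if_neg (by omega)]
        ring
      · simp only [List.getD_cons_succ]
        rw [pvInc_getD cs (e - 1) j (by omega) (by simp at hlt ⊢; omega)]
        congr 1
        by_cases hj : (j : Int) = e - 1
        · rw [if_pos hj, if_pos (by omega)]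
        · rw [if_neg hj, if_neg (by push_cast; omega)]

theorem foldl_pvInc_length : ∀ (L : List Int) (ch : List Int),
    (L.foldl pvInc ch).length = ch.length := by
  intro L
  induction L with
  | nil => intro ch; rfl
  | cons e L ih => intro ch; rw [List.foldl_cons, ih, length_pvInc]

theorem foldl_pvInc_getD : ∀ (L : List Int) (ch : List Int) (i : Nat),
    (∀ e ∈ L, 0 ≤ e ∧ e < (ch.length : Int)) →
    (L.foldl pvInc ch).getD i 0 = ch.getD i 0 + (L.count (Int.ofNat i) : Int) := by
  intro L
  induction L with
  | nil => intro ch i _; simp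
  | cons e L ih =>
    intro ch i hb
    rw [List.foldl_cons, ih _ _ (fun x hx => by
      have := hb x (List.mem_cons_of_mem _ hx)
      simpa [length_pvInc] using this)]
    rw [pvInc_getD ch e i (hb e List.mem_cons_self).1 (hb e List.mem_cons_self).2]
    rw [List.count_cons]
    by_cases hie : (i : Int) = e
    · rw [if_pos hie, if_pos (by simpa using hie.symm)]
      push_cast
      ring
    · rw [if_neg hie, if_neg (by simpa using fun h => hie h.symm)]
      push_cast
      ring

def cnt (m : Nat) (L : List Int) : List Nat := (List.range m).map (fun i => L.count (Int.ofNat i))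

theorem cnt_length (m : Nat) (L : List Int) : (cnt m L).length = m := by simp [cnt]

-- the checks list A computes is the counts vector
theorem checks_eq_cnt (m : Nat) (L : List Int) (hb : ∀ e ∈ L, 0 ≤ e ∧ e < (m : Int)) :
    L.foldl pvInc (List.replicate m 0) = (cnt m L).map Int.ofNat := by
  apply List.ext_getElem
  · simp [foldl_pvInc_length, cnt]
  · intro i h1 h2
    have hi : i < m := by simpa [foldl_pvInc_length] using h1
    have e1 : (L.foldl pvInc (List.replicate m 0))[i]
        = (L.foldl pvInc (List.replicate m 0)).getD i 0 := by
      rw [List.getD_eq_getElem]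
    rw [e1, foldl_pvInc_getD L _ i (by simpa using hb)]
    simp [cnt, hi]

-- the one-variable product over an index list is pw of the counts vector
theorem prod_map_getD_eq_pw : ∀ (m : Nat) (s : List Int), s.length = m →
    ∀ (L : List Int), (∀ e ∈ L, 0 ≤ e ∧ e < (m : Int)) →
    (L.map (fun e => s.getD e.toNat 1)).prod = pw s (cnt m L) := by
  intro m
  induction m with
  | zero =>
    intro s hs L hL
    rcases L with _ | ⟨e, L⟩
    · simp [pw, cnt]
    · have := hL e List.mem_cons_self
      omega
  | succ m ih =>
    intro s hs L hL
    rcases s with _ | ⟨σ, s'⟩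
    · simp at hs
    have hs' : s'.length = m := by simpa using hs
    -- split L into zeros and nonzeros
    have hperm : ((L.filter (fun e => e == 0)) ++ (L.filter (fun e => !(e == 0)))).Perm L :=
      List.filter_append_perm _ L
    have hprod : (L.map (fun e => (σ :: s').getD e.toNat 1)).prod
        = ((L.filter (fun e => e == 0)).map (fun e => (σ :: s').getD e.toNat 1)).prod
          * ((L.filter (fun e => !(e == 0))).map (fun e => (σ :: s').getD e.toNat 1)).prod := by
      rw [← List.prod_append, ← List.map_append]
      exact (List.Perm.prod_eq (hperm.map _)).symm
    have hzeros : ((L.filter (fun e => e == 0)).map (fun e => (σ :: s').getD e.toNat 1)).prod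
        = σ ^ (L.count 0) := by
      rw [List.prod_eq_pow_card _ σ (by
        intro x hx
        rcases List.mem_map.mp hx with ⟨e, he, rfl⟩
        have : e = 0 := by simpa using (List.mem_filter.mp he).2
        simp [this])]
      congr 1
      rw [List.length_map, List.count_eq_countP]
      exact List.countP_eq_length_filter.symm
    set L' : List Int := (L.filter (fun e => !(e == 0))).map (fun e => e - 1) with hL'
    have hnonzeros : ((L.filter (fun e => !(e == 0))).map (fun e => (σ :: s').getD e.toNat 1)).prod
        = (L'.map (fun e => s'.getD e.toNat 1)).prod := by
      rw [hL', List.map_map]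
      congr 1
      apply List.map_congr_left
      intro e he
      have he2 := List.mem_filter.mp he
      have hee : e ≠ 0 := by simpa using he2.2
      have hb := hL e he2.1
      have h1 : e.toNat = (e - 1).toNat + 1 := by omega
      simp only [Function.comp_def]
      rw [h1]
      simp
    have hbL' : ∀ e ∈ L', 0 ≤ e ∧ e < (m : Int) := by
      intro x hx
      rcases List.mem_map.mp hx with ⟨e, he, rfl⟩
      have he2 := List.mem_filter.mp he
      have hee : e ≠ 0 := by simpa using he2.2
      have hb := hL e he2.1
      push_cast at hb ⊢
      omega
    have hcnt : cnt (m + 1) L = L.count 0 :: cnt m L' := by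
      show (List.range (m+1)).map (fun i => L.count (Int.ofNat i)) = _
      rw [List.range_succ_eq_map, List.map_cons, List.map_map]
      show _ :: _ = _ :: (List.range m).map (fun i => L'.count (Int.ofNat i))
      refine congrArg₂ List.cons (by simp) ?_
      apply List.map_congr_left
      intro i _
      simp only [Function.comp_def, Nat.succ_eq_add_one]
      have hcast : (Int.ofNat (i + 1)) = (((i : Nat) : Int) + 1) := by simp
      rw [hcast, hL']
      have hne : (((i : Nat) : Int) + 1) ≠ 0 := by omega
      rw [← List.count_filter (p := fun e => !(e == 0)) (a := (((i : Nat) : Int) + 1)) (by simp [hne])]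
      have hinj := List.count_map_of_injective (L.filter (fun e => !(e == 0))) (· - 1)
        (fun x y h => by simpa using h) (((i : Nat) : Int) + 1)
      rw [← hinj]
      norm_num
    rw [hprod, hzeros, hnonzeros, ih s' hs' L' hbL', hcnt]
    simp only [pw, List.zipWith_cons_cons, List.prod_cons]

theorem mem_comb : ∀ (d : List Int) (k : Nat) (c : List Int),
    c ∈ pvCombinations d k → ∀ e ∈ c, e ∈ d
  | d, 0, c, hc => by
    simp only [pvCombinations, List.mem_singleton] at hc
    subst hc; simp
  | [], k + 1, c, hc => by simp [pvCombinations] at hc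
  | x :: xs, k + 1, c, hc => by
    simp only [pvCombinations, List.mem_append, List.mem_map] at hc
    rcases hc with ⟨c', hc', rfl⟩ | hc
    · intro e he
      rcases List.mem_cons.mp he with rfl | he
      · exact List.mem_cons_self
      · exact List.mem_cons_of_mem _ (mem_comb xs k c' hc' e he)
    · intro e he
      exact List.mem_cons_of_mem _ (mem_comb xs (k + 1) c hc e he)

theorem mem_prod : ∀ (arrays : List (List (List Int))) (T : List (List Int)),
    T ∈ pvProduct arrays → ∀ c ∈ T, ∃ xs ∈ arrays, c ∈ xs
  | [], T, hT => by
    simp only [pvProduct, List.mem_singleton] at hT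
    subst hT; simp
  | ar :: rest, T, hT => by
    simp only [pvProduct, List.mem_flatMap, List.mem_map] at hT
    obtain ⟨y, hy, T', hT', hEq⟩ := hT
    subst hEq
    intro c hc
    rcases List.mem_cons.mp hc with rfl | hc
    · exact ⟨ar, List.mem_cons_self, hy⟩
    · rcases mem_prod rest T' hT' c hc with ⟨xs, hxs, hcxs⟩
      exact ⟨xs, List.mem_cons_of_mem _ hxs, hcxs⟩

theorem cand_map (m : Nat) (s : List Int) (hs : s.length = m) :
    (PySem.List.pyRange 0 (m : Int) 1).map (fun e => s.getD e.toNat 1) = s := by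
  rw [PySem.List.pyRange_zero_nat m, List.map_map]
  apply List.ext_getElem
  · simp [hs]
  · intro i h1 h2
    simp only [List.getElem_map, List.getElem_range, Function.comp_def, Int.toNat_natCast]
    rw [List.getD_eq_getElem _ _ h2]

theorem foldl_mul (c : Nat → Int) : ∀ (l : List Nat) (b : Int),
    l.foldl (fun p k => p * c k) b = b * (l.map c).prod := by
  intro l
  induction l with
  | nil => intro b; simp
  | cons k l ih => intro b; rw [List.foldl_cons, ih, List.map_cons, List.prod_cons]; ring

theorem sum_range_list (n : Nat) (f : Nat → Int) :
    ((List.range n).map f).sum = ∑ t ∈ Finset.range n, f t := rfl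

theorem prod_map_prod_flatten (T : List (List Int)) (f : Int → Int) :
    (T.map (fun c => (c.map f).prod)).prod = ((T.flatten).map f).prod := by
  rw [List.map_flatten, List.prod_flatten, List.map_map]
  simp [Function.comp_def]

theorem core (m : Nat) (ones : List Nat) :
    PySem.Int.mod
      ((pvProduct (ones.map (fun one =>
          pvCombinations (PySem.List.pyRange 0 (m : Int) 1) one))).foldl
        (fun answer elements =>
          if (elements.foldl (fun ch elem => elem.foldl pvInc ch)
                (List.replicate m (0 : Int))).foldl
              (fun fl c => if PySem.Int.mod c 2 = 1 then false else fl) true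
          then answer + 1 else answer) (0 : Int)) (10 ^ 17 + 19)
    = PySem.Int.mod (PySem.Int.floordiv
        ((List.range (m + 1)).foldl (fun total t =>
          total + ones.foldl (fun p k =>
              p * (pvCoeffs (List.replicate t (-1) ++ List.replicate (m - t) 1)).getD k 0)
            ((pvCoeffs (List.replicate m 1)).getD t 0)) (0 : Int)) (2 ^ m)) (10 ^ 17 + 19) := by
  set candidate := PySem.List.pyRange 0 (m : Int) 1 with hcand
  set arrays := ones.map (fun one => pvCombinations candidate one) with harr
  -- bounds on the indices occurring in any tuple of the cartesian product
  have hbnd : ∀ T ∈ pvProduct arrays, ∀ e ∈ T.flatten, 0 ≤ e ∧ e < (m : Int) := by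
    intro T hT e he
    rcases List.mem_flatten.mp he with ⟨c, hcT, hec⟩
    rcases mem_prod arrays T hT c hcT with ⟨xs, hxs, hcxs⟩
    rcases List.mem_map.mp (harr ▸ hxs) with ⟨k, _, rfl⟩
    have : e ∈ candidate := mem_comb candidate k c hcxs e hec
    rw [hcand] at this
    have := (PySem.List.mem_pyRange_one).mp this
    omega
  -- the parity predicate
  set q : List (List Int) → Bool := fun T => decide (∀ c ∈ cnt m T.flatten, Even c) with hq
  -- ===== A side =====
  have hcount := PySem.List.foldl_count_if (fun elements : List (List Int) =>
    (elements.foldl (fun ch elem => elem.foldl pvInc ch) (List.replicate m (0 : Int))).foldl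
      (fun fl c => if PySem.Int.mod c 2 = 1 then false else fl) true) (pvProduct arrays) 0
  rw [hcount]
  rw [List.countP_congr (q := q) (by
    intro T hT
    rw [← List.foldl_flatten, checks_eq_cnt m _ (hbnd T hT),
      foldl_flag (fun c => PySem.Int.mod c 2 = 1)]
    simp only [Bool.true_and, List.all_map, List.all_eq_true, decide_eq_true_eq, hq]
    apply forall_congr'
    intro c
    apply imp_congr Iff.rfl
    simp only [Function.comp_def, decide_eq_true_eq]
    rw [PySem.Int.mod_eq_emod_of_pos (by norm_num)]
    rw [show Int.ofNat c = (c : Int) from rfl]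
    have hcc : ((c : Int) % 2 = 1) ↔ (c % 2 = 1) := by omega
    rw [hcc, Nat.even_iff]
    omega)]
  -- ===== B side =====
  rw [PySem.List.foldl_add (List.range (m + 1))
    (fun t => ones.foldl (fun p k =>
        p * (pvCoeffs (List.replicate t (-1) ++ List.replicate (m - t) 1)).getD k 0)
      ((pvCoeffs (List.replicate m 1)).getD t 0)) 0]
  rw [zero_add, sum_range_list]
  set g : List Int → Int := fun s => (ones.map (fun k => esym s k)).prod with hg
  have hB : ∀ t ∈ Finset.range (m + 1),
      ones.foldl (fun p k =>
          p * (pvCoeffs (List.replicate t (-1) ++ List.replicate (m - t) 1)).getD k 0)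
        ((pvCoeffs (List.replicate m 1)).getD t 0)
      = (m.choose t : Int) * g (pvVec m t) := by
    intro t _
    rw [foldl_mul, pvCoeffs_getD, esym_replicate_one, hg]
    congr 1
    show _ = (ones.map (fun k => esym (pvVec m t) k)).prod
    apply congrArg List.prod
    apply List.map_congr_left
    intro k _
    rw [pvCoeffs_getD]
    rfl
  rw [Finset.sum_congr rfl hB]
  -- ===== the character-sum identity =====
  have hginv : ∀ s s', s.Perm s' → g s = g s' := by
    intro s s' hp
    rw [hg]
    show (ones.map (fun k => esym s k)).prod = (ones.map (fun k => esym s' k)).prod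
    congr 1
    apply List.map_congr_left
    intro k _
    exact esym_perm hp k
  rw [← group_sum m g hginv]
  have hsign : ∀ s ∈ pvSigns m,
      g s = ((pvProduct arrays).map (fun T => pw s (cnt m T.flatten))).sum := by
    intro s hs
    have hlen := signs_length m s hs
    have hc : candidate.map (fun e => s.getD e.toNat 1) = s := cand_map m s hlen
    have step1 : g s = (arrays.map (fun xs =>
        (xs.map (fun c => (c.map (fun e => s.getD e.toNat 1)).prod)).sum)).prod := by
      rw [hg, harr, List.map_map]
      show (ones.map (fun k => esym s k)).prod = _
      congr 1
      apply List.map_congr_left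
      intro k _
      show esym s k = ((pvCombinations candidate k).map
          (fun c => (c.map (fun e => s.getD e.toNat 1)).prod)).sum
      rw [comb_sum, hc]
    rw [step1, ← prod_expand]
    congr 1
    apply List.map_congr_left
    intro T hT
    rw [prod_map_prod_flatten, prod_map_getD_eq_pw m s hlen _ (hbnd T hT)]
  rw [List.map_congr_left hsign]
  rw [sum_swap (pvSigns m) (pvProduct arrays) (fun s T => pw s (cnt m T.flatten))]
  have hparT : ∀ T ∈ pvProduct arrays,
      ((pvSigns m).map (fun s => pw s (cnt m T.flatten))).sum
        = (2 : Int) ^ m * (if q T then 1 else 0) := by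
    intro T _
    rw [parity_sum m _ (cnt_length m _)]
    rw [hq]
    by_cases hp : ∀ c ∈ cnt m T.flatten, Even c
    · rw [if_pos hp, if_pos (by simpa using hp)]
      ring
    · rw [if_neg hp, if_neg (by simpa using hp)]
      ring
  rw [List.map_congr_left hparT, List.sum_map_mul_left, PySem.List.sum_map_ite_one_zero]
  -- ===== final arithmetic =====
  rw [PySem.Int.floordiv_eq_ediv_of_pos (by positivity), zero_add,
    Int.mul_ediv_cancel_left _ (by positivity)]

theorem solution_eq_alt (a : List (List Int)) : solution a = solution_alt a := by
  unfold solution solution_alt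
  exact core a.length (pvOnes a)

-- ===== VERDICT (by name: the statement is the Claim_ definition above) =====
theorem solution_spec : Claim_equal_solution := by
  intro a _ _
  show solution a = solution_alt a
  exact solution_eq_alt a
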